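-- pv_equiv track=rewrite | github.com/AleksandrSechin/Python | Seminar/Задача33.py | invertMaxMarks
-- ===== SOURCE A (Python) =====
-- def invertMaxMarks(marks):
--     max_mark = min_mark = marks[0]
--     index_max_mark = [0]
--     for i in range(len(marks)):
--         if marks[i] > max_mark:
--             max_mark = marks[i]
--             index_max_mark = [i]
--         elif max_mark == marks[i]:
--             index_max_mark.append(i)
--         if marks[i] < min_mark:
--             min_mark = marks[i]
--     for i in index_max_mark:
--         marks[i] = min_mark
--     return marks
-- ===== SOURCE B (Python) =====
-- def invertMaxMarks(marks):
--     hi, lo = max(marks), min(marks)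
--     marks[:] = [lo if x == hi else x for x in marks]
--     return marks
-- ===== Notes on version B (the rewrite author's own statement) =====
-- stated objective: simpler
-- what changed: Replaces A's hand-maintained running max/min with an index list of maxima (rebuilt/appended during the scan, then a second index-assignment loop) by max()/min() plus a single value-level comprehension that rewrites the list in place; no index bookkeeping at all.
import Mathlib
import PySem

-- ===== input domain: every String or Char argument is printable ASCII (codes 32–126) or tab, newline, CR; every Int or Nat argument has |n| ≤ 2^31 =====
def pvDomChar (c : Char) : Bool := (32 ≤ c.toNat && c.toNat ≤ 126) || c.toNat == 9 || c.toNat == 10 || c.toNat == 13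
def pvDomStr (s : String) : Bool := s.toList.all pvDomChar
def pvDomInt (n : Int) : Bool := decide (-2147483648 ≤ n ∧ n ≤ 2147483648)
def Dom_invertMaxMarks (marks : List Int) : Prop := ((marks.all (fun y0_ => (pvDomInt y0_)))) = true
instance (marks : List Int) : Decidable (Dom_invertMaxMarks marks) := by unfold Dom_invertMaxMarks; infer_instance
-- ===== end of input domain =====

-- B replaces A's maintained index-of-maxima list (and second index loop) with max()/min()
-- and one value-level rewrite of the list; simpler. Both Pythons mutate `marks` in place;
-- the equivalence proved here is about the returned value.

-- ===== PORT A =====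
-- one iteration of A's first loop: state = (max_mark, min_mark, index_max_mark)
def pvStepA (marks : List Int) (st : Int × Int × List Nat) (i : Nat) : Int × Int × List Nat :=
  let x := marks.getD i 0      -- marks[i], always in range here
  let p : Int × List Nat :=
    if st.1 < x then (x, [i])
    else if st.1 = x then (st.1, st.2.2 ++ [i])
    else (st.1, st.2.2)
  (p.1, if x < st.2.1 then x else st.2.1, p.2)

def invertMaxMarks (marks : List Int) : List Int :=
  let m0 := marks.getD 0 0     -- marks[0]; Pre_ excludes the empty list, where Python raises
  let s := (List.range marks.length).foldl (pvStepA marks) (m0, m0, [0])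
  s.2.2.foldl (fun acc i => acc.set i s.2.1) marks

-- ===== PORT B =====
def invertMaxMarks_alt (marks : List Int) : List Int :=
  match PySem.List.max? marks (fun x => x), PySem.List.min? marks (fun x => x) with
  | some hi, some lo => marks.map (fun x => if x = hi then lo else x)
  | _, _ => []                 -- unreachable inside Pre_ (max/min raise on empty)

-- ===== PRECONDITION & SPEC =====
-- A raises IndexError (marks[0]) on the empty list; B raises ValueError (max of empty).
def Pre_invertMaxMarks (marks : List Int) : Prop := marks ≠ []
instance (marks : List Int) : Decidable (Pre_invertMaxMarks marks) := by unfold Pre_invertMaxMarks; infer_instance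
def pvWitness_invertMaxMarks : List Int := [3, 1, 3, 2]

def Spec_invertMaxMarks (marks : List Int) (out : List Int) : Prop := out = invertMaxMarks_alt marks
instance (marks : List Int) (out : List Int) : Decidable (Spec_invertMaxMarks marks out) := by unfold Spec_invertMaxMarks; infer_instance

-- ===== CLAIM (what is proved, stated in full; the proofs are below) =====
def Claim_equal_invertMaxMarks : Prop := ∀ (marks : List Int), Dom_invertMaxMarks marks → Pre_invertMaxMarks marks → Spec_invertMaxMarks marks (invertMaxMarks marks)

-- ===== LEMMAS AND PROOFS =====

-- running max / min / index list after the first n iterations of A's first loop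
def pvMxN (marks : List Int) (n : Nat) : Int := (marks.take n).foldl max (marks.getD 0 0)
def pvMnN (marks : List Int) (n : Nat) : Int := (marks.take n).foldl min (marks.getD 0 0)
def pvIdxN (marks : List Int) (n : Nat) : List Nat :=
  (if marks.getD 0 0 = pvMxN marks n then [0] else []) ++
  (List.range n).filter (fun i => marks.getD i 0 = pvMxN marks n)

theorem pv_le_foldl_max (l : List Int) (b : Int) : b ≤ l.foldl max b := by
  induction l generalizing b with
  | nil => simp
  | cons a t ih => exact le_trans (le_max_left b a) (ih _)

theorem pv_mem_le_foldl_max (l : List Int) (b a : Int) (h : a ∈ l) : a ≤ l.foldl max b := by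
  induction l generalizing b with
  | nil => cases h
  | cons c t ih =>
    rcases List.mem_cons.mp h with rfl | h'
    · exact le_trans (le_max_right b a) (pv_le_foldl_max _ _)
    · exact ih _ h'

theorem pv_getD_le_mxN (marks : List Int) (n i : Nat) (hi : i < n) (hn : n ≤ marks.length) :
    marks.getD i 0 ≤ pvMxN marks n := by
  have hlen : i < marks.length := lt_of_lt_of_le hi hn
  have hmem : marks[i] ∈ marks.take n := by
    have : (marks.take n)[i]'(by rw [List.length_take]; omega) = marks[i] := List.getElem_take
    exact this ▸ List.getElem_mem _
  rw [List.getD_eq_getElem _ _ hlen]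
  exact pv_mem_le_foldl_max _ _ _ hmem

theorem pv_m0_le_mxN (marks : List Int) (n : Nat) : marks.getD 0 0 ≤ pvMxN marks n :=
  pv_le_foldl_max _ _

theorem pv_mxN_succ (marks : List Int) (n : Nat) (hn : n < marks.length) :
    pvMxN marks (n + 1) = max (pvMxN marks n) (marks.getD n 0) := by
  unfold pvMxN
  rw [List.take_add_one, List.getElem?_eq_getElem hn, List.getD_eq_getElem _ _ hn,
    Option.toList_some, List.foldl_append, List.foldl_cons, List.foldl_nil]

theorem pv_mnN_succ (marks : List Int) (n : Nat) (hn : n < marks.length) :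
    pvMnN marks (n + 1) = min (pvMnN marks n) (marks.getD n 0) := by
  unfold pvMnN
  rw [List.take_add_one, List.getElem?_eq_getElem hn, List.getD_eq_getElem _ _ hn,
    Option.toList_some, List.foldl_append, List.foldl_cons, List.foldl_nil]

-- invariant of A's first loop
theorem pv_loopA_inv (marks : List Int) (n : Nat) (hn : n ≤ marks.length) :
    (List.range n).foldl (pvStepA marks) (marks.getD 0 0, marks.getD 0 0, [0])
      = (pvMxN marks n, pvMnN marks n, pvIdxN marks n) := by
  induction n with
  | zero => simp [pvMxN, pvMnN, pvIdxN]
  | succ n ih =>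
    have hn' : n < marks.length := hn
    rw [List.range_succ, List.foldl_append, ih (le_of_lt hn'), List.foldl_cons, List.foldl_nil]
    have hmx := pv_mxN_succ marks n hn'
    have hmn := pv_mnN_succ marks n hn'
    have hfilter : (List.range (n+1)).filter (fun i => marks.getD i 0 = pvMxN marks (n+1))
        = ((List.range n).filter (fun i => marks.getD i 0 = pvMxN marks (n+1)))
          ++ (if marks.getD n 0 = pvMxN marks (n+1) then [n] else []) := by
      rw [List.range_succ, List.filter_append]
      simp [List.filter_cons, List.getD]
    have hmneq : (if marks.getD n 0 < pvMnN marks n then marks.getD n 0 else pvMnN marks n)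
        = pvMnN marks (n+1) := by
      rw [hmn]; split_ifs with h <;> omega
    by_cases hgt : pvMxN marks n < marks.getD n 0
    · -- new strict maximum at n
      have hx1 : pvMxN marks (n+1) = marks.getD n 0 := by
        rw [hmx]; exact max_eq_right (le_of_lt hgt)
      have hpre : ¬ marks.getD 0 0 = pvMxN marks (n+1) := by
        rw [hx1]; exact ne_of_lt (lt_of_le_of_lt (pv_m0_le_mxN marks n) hgt)
      have hfilt0 : (List.range n).filter (fun i => marks.getD i 0 = pvMxN marks (n+1)) = [] := by
        rw [List.filter_eq_nil_iff]
        intro i hi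
        have := pv_getD_le_mxN marks n i (List.mem_range.mp hi) (le_of_lt hn')
        rw [hx1]
        simp only [decide_eq_true_eq]
        exact ne_of_lt (lt_of_le_of_lt this hgt)
      simp only [pvStepA]
      rw [if_pos hgt]
      refine Prod.ext ?_ (Prod.ext ?_ ?_)
      · exact hx1.symm
      · exact hmneq
      · show [n] = pvIdxN marks (n+1)
        simp only [pvIdxN, hfilter, hfilt0, if_neg hpre, if_pos hx1.symm,
          List.nil_append, List.append_nil]
    · by_cases heq : pvMxN marks n = marks.getD n 0
      · -- another occurrence of the current maximum
        have hx1 : pvMxN marks (n+1) = pvMxN marks n := by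
          rw [hmx, ← heq]; simp
        simp only [pvStepA]
        rw [if_neg hgt, if_pos heq]
        refine Prod.ext ?_ (Prod.ext ?_ ?_)
        · exact hx1.symm
        · exact hmneq
        · show pvIdxN marks n ++ [n] = pvIdxN marks (n+1)
          rw [hx1] at hfilter
          simp only [pvIdxN, hx1, hfilter, if_pos heq.symm, List.append_assoc]
      · -- strictly smaller element
        have hlt : marks.getD n 0 < pvMxN marks n :=
          lt_of_le_of_ne (not_lt.mp hgt) (fun h => heq h.symm)
        have hx1 : pvMxN marks (n+1) = pvMxN marks n := by
          rw [hmx]; exact max_eq_left (le_of_lt hlt)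
        have hxn : ¬ marks.getD n 0 = pvMxN marks (n+1) := by
          rw [hx1]; exact ne_of_lt hlt
        simp only [pvStepA]
        rw [if_neg hgt, if_neg heq]
        refine Prod.ext ?_ (Prod.ext ?_ ?_)
        · exact hx1.symm
        · exact hmneq
        · show pvIdxN marks n = pvIdxN marks (n+1)
          rw [hx1] at hfilter hxn
          simp only [pvIdxN, hx1, hfilter, if_neg hxn, List.append_nil]

theorem pv_length_foldl_set (idxs : List Nat) (l : List Int) (v : Int) :
    (idxs.foldl (fun acc i => acc.set i v) l).length = l.length := by
  induction idxs generalizing l with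
  | nil => rfl
  | cons i t ih => simp [List.foldl_cons, ih, List.length_set]

theorem pv_getD_foldl_set (idxs : List Nat) (l : List Int) (v : Int) (j : Nat) :
    (idxs.foldl (fun acc i => acc.set i v) l).getD j 0
      = if j ∈ idxs ∧ j < l.length then v else l.getD j 0 := by
  induction idxs generalizing l with
  | nil => simp
  | cons i t ih =>
    rw [List.foldl_cons, ih]
    by_cases hjt : j ∈ t
    · by_cases hjl : j < l.length
      · simp [hjt, hjl, List.length_set]
      · simp [hjt, hjl, List.length_set]
    · by_cases hji : j = i
      · subst hji
        by_cases hjl : j < l.length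
        · simp [hjt, hjl, List.length_set, List.getD_eq_getElem?_getD, List.getElem?_set_self,
            List.getElem?_eq_getElem hjl]
        · simp [hjt, hjl, List.length_set, List.getD_eq_getElem?_getD, List.getElem?_set]
      · simp [hjt, hji, List.length_set, List.getD_eq_getElem?_getD, List.getElem?_set,
          Ne.symm hji]

-- ===== VERDICT (by name: the statement is the Claim_ definition above) =====
theorem invertMaxMarks_spec : Claim_equal_invertMaxMarks := by
  intro marks _ hpre
  unfold Spec_invertMaxMarks
  obtain ⟨a, t, rfl⟩ : ∃ a t, marks = a :: t := by
    cases marks with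
    | nil => exact absurd rfl hpre
    | cons a t => exact ⟨a, t, rfl⟩
  have hmx : pvMxN (a :: t) (a :: t).length = t.foldl max a := by
    unfold pvMxN
    simp [List.take_length]
  have hmn : pvMnN (a :: t) (a :: t).length = t.foldl min a := by
    unfold pvMnN
    simp [List.take_length]
  have hB : invertMaxMarks_alt (a :: t)
      = (a :: t).map (fun x =>
          if x = pvMxN (a :: t) (a :: t).length then pvMnN (a :: t) (a :: t).length else x) := by
    unfold invertMaxMarks_alt
    rw [PySem.List.max?_id_cons, PySem.List.min?_id_cons, ← hmx, ← hmn]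
  have hA : invertMaxMarks (a :: t)
      = (pvIdxN (a :: t) (a :: t).length).foldl
          (fun acc i => acc.set i (pvMnN (a :: t) (a :: t).length)) (a :: t) := by
    unfold invertMaxMarks
    simp only [pv_loopA_inv (a :: t) (a :: t).length le_rfl]
  rw [hA, hB]
  -- membership in the final index list, for j < length
  have hmem : ∀ j, j < (a :: t).length →
      (j ∈ pvIdxN (a :: t) (a :: t).length
        ↔ (a :: t).getD j 0 = pvMxN (a :: t) (a :: t).length) := by
    intro j hj
    unfold pvIdxN
    constructor
    · intro h
      rcases List.mem_append.mp h with h | h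
      · by_cases h0 : (a :: t).getD 0 0 = pvMxN (a :: t) (a :: t).length
        · rw [if_pos h0] at h
          have hj0 : j = 0 := by simpa using h
          rw [hj0]; exact h0
        · rw [if_neg h0] at h; cases h
      · simpa using (List.mem_filter.mp h).2
    · intro h
      refine List.mem_append.mpr (Or.inr ?_)
      exact List.mem_filter.mpr ⟨List.mem_range.mpr hj, by simpa using h⟩
  apply List.ext_getElem?
  intro j
  by_cases hj : j < (a :: t).length
  · rw [List.getElem?_eq_getElem (by rw [pv_length_foldl_set]; exact hj),
        List.getElem?_eq_getElem (by rw [List.length_map]; exact hj)]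
    have hL : ((pvIdxN (a :: t) (a :: t).length).foldl
          (fun acc i => acc.set i (pvMnN (a :: t) (a :: t).length)) (a :: t))[j]'(by
            rw [pv_length_foldl_set]; exact hj)
        = ((pvIdxN (a :: t) (a :: t).length).foldl
          (fun acc i => acc.set i (pvMnN (a :: t) (a :: t).length)) (a :: t)).getD j 0 := by
      rw [List.getD_eq_getElem _ _ (by rw [pv_length_foldl_set]; exact hj)]
    rw [hL, pv_getD_foldl_set, List.getElem_map]
    by_cases hmemj : (a :: t).getD j 0 = pvMxN (a :: t) (a :: t).length
    · rw [if_pos ⟨(hmem j hj).mpr hmemj, hj⟩,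
          if_pos (by rw [← List.getD_eq_getElem _ _ hj]; exact hmemj)]
    · rw [if_neg (by rintro ⟨h1, -⟩; exact hmemj ((hmem j hj).mp h1)),
          if_neg (by rw [← List.getD_eq_getElem _ _ hj]; exact hmemj),
          List.getD_eq_getElem _ _ hj]
  · rw [List.getElem?_eq_none (by rw [pv_length_foldl_set]; omega),
        List.getElem?_eq_none (by rw [List.length_map]; omega)]
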